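-- pv_equiv track=rewrite | github.com/zulumonkeymetallic/bob | tests/gateway/test_matrix.py | _strip_fallback
-- ===== SOURCE A (Python) =====
-- def _strip_fallback(body: str, has_reply: bool = True) -> str:
--     """Simulate the reply fallback stripping logic from _on_room_message."""
--     reply_to = "some_event_id" if has_reply else None
--     if reply_to and body.startswith("> "):
--         lines = body.split("\n")
--         stripped = []
--         past_fallback = False
--         for line in lines:
--             if not past_fallback:
--                 if line.startswith("> ") or line == ">":
--                     continue
--                 if line == "":
--                     past_fallback = True
--                     continue
--                 past_fallback = True
--             stripped.append(line)
--         body = "\n".join(stripped) if stripped else body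
--     return body
-- ===== SOURCE B (Python) =====
-- def _strip_fallback(body: str, has_reply: bool = True) -> str:
--     """String-level scan: walk past the leading quote block via find('\n') and
--     slicing, never building a line list; then drop at most one leading newline."""
--     if not (has_reply and body.startswith("> ")):
--         return body
--     rest = body
--     while True:
--         k = rest.find("\n")
--         line = rest if k == -1 else rest[:k]
--         if line.startswith("> ") or line == ">":
--             if k == -1:
--                 return body  # quote block is the whole message
--             rest = rest[k + 1:]
--         else:
--             break
--     if rest == "":
--         return body  # only a trailing blank line followed the quotes
--     if rest.startswith("\n"):
--         rest = rest[1:]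
--     return rest
-- ===== Notes on version B (the rewrite author's own statement) =====
-- stated objective: alternative
-- what changed: B walks the raw string with find(' ') and slicing to skip the quote block (and then at most one leading newline), never building a line list, a per-line flag, or an output accumulator as A does.
import Mathlib
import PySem

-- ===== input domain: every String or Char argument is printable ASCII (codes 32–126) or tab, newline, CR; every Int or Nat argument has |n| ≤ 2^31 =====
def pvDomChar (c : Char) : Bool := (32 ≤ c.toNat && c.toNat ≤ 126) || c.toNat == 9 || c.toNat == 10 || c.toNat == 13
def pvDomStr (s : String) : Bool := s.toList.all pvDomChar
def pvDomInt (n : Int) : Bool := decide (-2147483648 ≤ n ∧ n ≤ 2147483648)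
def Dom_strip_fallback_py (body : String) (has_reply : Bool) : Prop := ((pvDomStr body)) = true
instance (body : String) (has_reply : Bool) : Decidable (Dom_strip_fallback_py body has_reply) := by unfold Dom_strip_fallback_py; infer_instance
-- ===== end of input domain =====

-- B scans the raw string with find('\n') and slicing instead of splitting into a
-- line list and filtering it with a flag (objective: alternative decomposition).

-- ===== PORT A =====
def stripStepA (st : List String × Bool) (line : String) : List String × Bool :=
  if st.2 = false then
    if PySem.Str.startswith line "> " || line == ">" then st
    else if line = "" then (st.1, true)
    else (st.1 ++ [line], true)
  else (st.1 ++ [line], true)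

def strip_fallback_py (body : String) (has_reply : Bool) : String :=
  if has_reply && PySem.Str.startswith body "> " then
    let lines := (PySem.Str.split? body "\n").getD []
    let stripped := (lines.foldl stripStepA ([], false)).1
    if stripped.isEmpty then body else PySem.Str.join "\n" stripped
  else body

-- ===== PORT B =====
-- the while loop of Source B over the character list; none = the early 'return body'.
-- rest[:k] and rest[k+1:] are List.take k.toNat / List.drop (k.toNat+1): exact
-- because in those branches k = rest.find("\n") with 0 ≤ k < rest.length.
def stripLoopB (rest : List Char) : Option (List Char) :=
  let k := PySem.Chars.find rest ['\n']
  let line := if k = -1 then rest else rest.take k.toNat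
  if PySem.Chars.startswith line ['>', ' '] || line == ['>'] then
    if hk : k = -1 then none
    else stripLoopB (rest.drop (k.toNat + 1))
  else some rest
termination_by rest.length
decreasing_by
  have hinf : ['\n'] <:+: rest := (PySem.Chars.find_ne_neg_one_iff rest ['\n']).mp hk
  have hne : rest ≠ [] := by
    rintro rfl
    simp at hinf
  have : 0 < rest.length := List.length_pos_iff.mpr hne
  simp only [List.length_drop]
  omega

def strip_fallback_py_alt (body : String) (has_reply : Bool) : String :=
  if has_reply && PySem.Str.startswith body "> " then
    match stripLoopB body.toList with
    | none => body
    | some rest =>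
      if rest = [] then body
      else if PySem.Chars.startswith rest ['\n'] then String.ofList (rest.drop 1)
      else String.ofList rest
  else body

-- ===== PRECONDITION & SPEC =====
def Spec_strip_fallback_py (body : String) (has_reply : Bool) (out : String) : Prop := out = strip_fallback_py_alt body has_reply
instance (body : String) (has_reply : Bool) (out : String) : Decidable (Spec_strip_fallback_py body has_reply out) := by unfold Spec_strip_fallback_py; infer_instance

-- ===== CLAIM (what is proved, stated in full; the proofs are below) =====
def Claim_equal_strip_fallback_py : Prop := ∀ (body : String) (has_reply : Bool), Dom_strip_fallback_py body has_reply → Spec_strip_fallback_py body has_reply (strip_fallback_py body has_reply)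

-- ===== LEMMAS AND PROOFS =====

-- A-side characterisation: the flag fold drops the leading quote block, then one blank.
def dropQuotesS : List String → List String
  | [] => []
  | l :: t => if PySem.Str.startswith l "> " || l == ">" then dropQuotesS t else l :: t

def skipBlankS : List String → List String
  | [] => []
  | l :: t => if l = "" then t else l :: t

lemma foldA_true (lines acc : List String) :
    lines.foldl stripStepA (acc, true) = (acc ++ lines, true) := by
  induction lines generalizing acc with
  | nil => simp
  | cons l t ih => simp [stripStepA, ih]

lemma foldA_false (lines : List String) :
    (lines.foldl stripStepA ([], false)).1 = skipBlankS (dropQuotesS lines) := by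
  induction lines with
  | nil => simp [dropQuotesS, skipBlankS]
  | cons l t ih =>
    by_cases hq : PySem.Chars.startswith l.toList ['>', ' '] = true ∨ l = ">"
    · simpa [stripStepA, dropQuotesS, hq] using ih
    · by_cases hb : l = ""
      · simp [stripStepA, dropQuotesS, skipBlankS, hb, foldA_true,
              PySem.Chars.startswith]
      · simp [stripStepA, dropQuotesS, skipBlankS, hq, hb, foldA_true]

-- split characterisation: sp cs = (first line, remaining lines) of cs.split("\n")
def sp : List Char → List Char × List (List Char)
  | [] => ([], [])
  | c :: t => let p := sp t; if c = '\n' then ([], p.1 :: p.2) else (c :: p.1, p.2)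

lemma splitOn_go_sp (fuel : Nat) (l cur : List Char) (acc : List (List Char))
    (h : l.length < fuel) :
    PySem.Chars.splitOn.go ['\n'] fuel l cur acc
      = acc.reverse ++ (cur.reverse ++ (sp l).1) :: (sp l).2 := by
  induction fuel generalizing l cur acc with
  | zero => omega
  | succ fuel ih =>
    cases l with
    | nil => simp [PySem.Chars.splitOn.go, sp]
    | cons c t =>
      by_cases hc : c = '\n'
      · subst hc
        have hstep : PySem.Chars.splitOn.go ['\n'] (fuel + 1) ('\n' :: t) cur acc
            = PySem.Chars.splitOn.go ['\n'] fuel t [] (cur.reverse :: acc) := by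
          rw [PySem.Chars.splitOn.go]
          simp [List.isPrefixOf]
        rw [hstep, ih t [] _ (by simp at h; omega)]
        simp [sp]
      · have hstep : PySem.Chars.splitOn.go ['\n'] (fuel + 1) (c :: t) cur acc
            = PySem.Chars.splitOn.go ['\n'] fuel t (c :: cur) acc := by
          rw [PySem.Chars.splitOn.go]
          have hb : ('\n' == c) = false := by simp [Ne.symm hc]
          simp [List.isPrefixOf, hb]
        rw [hstep, ih t (c :: cur) acc (by simpa using h)]
        simp [sp, hc]

lemma splitOn_nl (cs : List Char) :
    PySem.Chars.splitOn cs ['\n'] = (sp cs).1 :: (sp cs).2 := by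
  unfold PySem.Chars.splitOn
  rw [splitOn_go_sp _ _ _ _ (by omega)]
  simp

lemma join_sp (cs : List Char) :
    PySem.Chars.join ['\n'] ((sp cs).1 :: (sp cs).2) = cs := by
  induction cs with
  | nil => simp [sp, PySem.Chars.join_singleton]
  | cons c t ih =>
    by_cases hc : c = '\n'
    · subst hc
      have hsp : sp ('\n' :: t) = ([], (sp t).1 :: (sp t).2) := by simp [sp]
      rw [hsp, PySem.Chars.join_cons_cons]
      simpa using ih
    · have hsp : sp (c :: t) = (c :: (sp t).1, (sp t).2) := by simp [sp, hc]
      rw [hsp]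
      cases hsp2 : (sp t).2 with
      | nil =>
        rw [hsp2] at ih
        rw [PySem.Chars.join_singleton] at ih ⊢
        simp [ih]
      | cons q r =>
        rw [hsp2] at ih
        rw [PySem.Chars.join_cons_cons] at ih ⊢
        simpa using ih

lemma sp_no_nl (cs : List Char) :
    ∀ p ∈ (sp cs).1 :: (sp cs).2, '\n' ∉ p := by
  induction cs with
  | nil => simp [sp]
  | cons c t ih =>
    by_cases hc : c = '\n'
    · subst hc; simpa [sp] using ih
    · intro p hp
      simp only [sp, hc, if_false, List.mem_cons] at hp
      rcases hp with h | h
      · subst h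
        intro hmem
        rcases List.mem_cons.mp hmem with h | h
        · exact hc h.symm
        · exact ih _ (List.mem_cons_self) h
      · exact ih _ (List.mem_cons_of_mem _ h)

lemma singleton_prefix_drop (x : Char) (l : List Char) (i : Nat) :
    [x] <+: l.drop i ↔ l[i]? = some x := by
  cases hd : l.drop i with
  | nil =>
    constructor
    · intro h; exact absurd (List.prefix_nil.mp h) (by simp)
    · intro h
      have : i < l.length := (List.getElem?_eq_some_iff.mp h).1
      have := List.drop_eq_nil_iff.mp hd
      omega
  | cons a t =>
    have : l[i]? = some a := by
      have h0 := List.getElem?_drop (xs := l) (i := i) (j := 0)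
      rw [hd] at h0
      simpa using h0.symm
    simp [List.cons_prefix_iff, this]

lemma find_nl_append (f t : List Char) (h : '\n' ∉ f) :
    PySem.Chars.find (f ++ '\n' :: t) ['\n'] = (f.length : Int) := by
  set cs := f ++ '\n' :: t with hcs
  have hinf : ['\n'] <:+: cs := by
    rw [List.singleton_infix_iff]; simp [hcs]
  have hnn : 0 ≤ PySem.Chars.find cs ['\n'] :=
    (PySem.Chars.find_nonneg_iff cs ['\n']).mpr hinf
  obtain ⟨h1, h2⟩ := PySem.Chars.find_spec hnn
  set k := (PySem.Chars.find cs ['\n']).toNat with hk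
  have hget : cs[k]? = some '\n' := (singleton_prefix_drop _ _ _).mp h1
  have hfl : cs[f.length]? = some '\n' := by
    simp [hcs]
  have hkf : k = f.length := by
    by_contra hne
    rcases Nat.lt_or_ge k f.length with hlt | hge
    · have hk2 : cs[k]? = f[k]? := by
        rw [hcs, List.getElem?_append_left hlt]
      rw [hk2] at hget
      exact h (List.mem_of_getElem? hget)
    · have hlt : f.length < k := by omega
      exact h2 f.length hlt ((singleton_prefix_drop _ _ _).mpr hfl)
  omega

lemma find_nl_none (f : List Char) (h : '\n' ∉ f) :
    PySem.Chars.find f ['\n'] = -1 := by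
  rw [PySem.Chars.find_eq_neg_one_iff]
  rw [List.singleton_infix_iff]
  exact h

def dropQC : List (List Char) → List (List Char)
  | [] => []
  | l :: t => if PySem.Chars.startswith l ['>', ' '] || l == ['>'] then dropQC t else l :: t

lemma dropQC_cons (l : List Char) (t : List (List Char)) :
    dropQC (l :: t)
      = if PySem.Chars.startswith l ['>', ' '] || l == ['>'] then dropQC t else l :: t := rfl

lemma dropQC_subset (P : List (List Char)) : ∀ p ∈ dropQC P, p ∈ P := by
  induction P with
  | nil => simp [dropQC]
  | cons l t ih =>
    intro p hp
    by_cases hq : (PySem.Chars.startswith l ['>', ' '] || l == ['>']) = true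
    · exact List.mem_cons_of_mem _ (ih p (by simpa [dropQC_cons, hq] using hp))
    · simpa [dropQC_cons, hq] using List.mem_cons.mpr (by simpa [dropQC_cons, hq] using hp)

lemma map_dropQuotesS (ls : List String) :
    (dropQuotesS ls).map String.toList = dropQC (ls.map String.toList) := by
  induction ls with
  | nil => simp [dropQuotesS, dropQC]
  | cons l t ih =>
    have hsw : PySem.Str.startswith l "> " = PySem.Chars.startswith l.toList ['>', ' '] := by
      simp [PySem.Str.startswith_eq]
    have heq : (l == ">") = (l.toList == ['>']) := by
      by_cases hl : l = ">"
      · subst hl; rfl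
      · have hlt : l.toList ≠ ['>'] := by
          intro hc
          exact hl (String.toList_inj.mp (by simpa using hc))
        simp [hl, hlt]
    by_cases hq : (PySem.Str.startswith l "> " || l == ">") = true
    · rw [dropQuotesS, if_pos hq]
      simp only [List.map_cons]
      rw [dropQC_cons, if_pos (by rw [← hsw, ← heq]; exact hq)]
      exact ih
    · rw [dropQuotesS, if_neg hq]
      simp only [List.map_cons]
      rw [dropQC_cons, if_neg (by rw [← hsw, ← heq]; exact hq)]

lemma stripLoopB_join : ∀ (P : List (List Char)), P ≠ [] → (∀ p ∈ P, '\n' ∉ p) →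
    stripLoopB (PySem.Chars.join ['\n'] P)
      = if dropQC P = [] then none else some (PySem.Chars.join ['\n'] (dropQC P)) := by
  intro P
  induction P with
  | nil => intro h _; exact absurd rfl h
  | cons f r ih =>
    intro _ hnl
    have hf : '\n' ∉ f := hnl f List.mem_cons_self
    cases r with
    | nil =>
      rw [PySem.Chars.join_singleton, stripLoopB]
      simp only [find_nl_none f hf, reduceIte, dropQC]
      by_cases hq : (PySem.Chars.startswith f ['>', ' '] || f == ['>']) = true
      · simp [hq]
      · simp [hq, PySem.Chars.join_singleton]
    | cons g r' =>
      rw [PySem.Chars.join_cons_cons, stripLoopB]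
      have hJ : f ++ ['\n'] ++ PySem.Chars.join ['\n'] (g :: r')
          = f ++ '\n' :: PySem.Chars.join ['\n'] (g :: r') := by simp
      rw [hJ]
      have hfind := find_nl_append f (PySem.Chars.join ['\n'] (g :: r')) hf
      have hne1 : ¬ ((f.length : Int) = -1) := by omega
      have htake : (f ++ '\n' :: PySem.Chars.join ['\n'] (g :: r')).take ((f.length : Int)).toNat = f := by
        simp
      have hdrop : (f ++ '\n' :: PySem.Chars.join ['\n'] (g :: r')).drop (((f.length : Int)).toNat + 1)
          = PySem.Chars.join ['\n'] (g :: r') := by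
        have h2 : f ++ '\n' :: PySem.Chars.join ['\n'] (g :: r')
            = (f ++ ['\n']) ++ PySem.Chars.join ['\n'] (g :: r') := by simp
        have hlen : (f ++ ['\n']).length = ((f.length : Int)).toNat + 1 := by simp
        rw [h2, ← hlen, List.drop_left]
      simp only [hfind, hne1, htake, hdrop, dite_eq_ite, if_false]
      by_cases hq : (PySem.Chars.startswith f ['>', ' '] || f == ['>']) = true
      · rw [if_pos hq, dropQC_cons, if_pos hq]
        exact ih (by simp) (fun p hp => hnl p (List.mem_cons_of_mem _ hp))
      · rw [if_neg hq, dropQC_cons, if_neg hq]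
        simp [PySem.Chars.join_cons_cons]

lemma toList_ne_nil (s : String) (h : s ≠ "") : s.toList ≠ [] := by
  intro hc
  exact h (String.toList_inj.mp (by simpa using hc))

-- ===== VERDICT (by name: the statement is the Claim_ definition above) =====
theorem strip_fallback_py_spec : Claim_equal_strip_fallback_py := by
  intro body hr _
  unfold Spec_strip_fallback_py strip_fallback_py strip_fallback_py_alt
  by_cases hg : (hr && PySem.Str.startswith body "> ") = true
  · rw [if_pos hg, if_pos hg]
    have hbr := PySem.Str.split?_map body "\n"
    have hnl : ("\n" : String).toList = ['\n'] := by simp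
    rw [hnl] at hbr
    have hsome : PySem.Chars.split? body.toList ['\n']
        = some (PySem.Chars.splitOn body.toList ['\n']) := by
      simp [PySem.Chars.split?]
    rw [hsome] at hbr
    cases hL : PySem.Str.split? body "\n" with
    | none => rw [hL] at hbr; simp at hbr
    | some L =>
      rw [hL] at hbr
      have hmap : L.map String.toList = (sp body.toList).1 :: (sp body.toList).2 := by
        have h1 := Option.some.inj (by simpa using hbr)
        rw [splitOn_nl] at h1
        exact h1
      simp only [Option.getD_some]
      rw [foldA_false]
      have hjoin : PySem.Chars.join ['\n'] (L.map String.toList) = body.toList := by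
        rw [hmap]; exact join_sp body.toList
      have hnlP : ∀ p ∈ L.map String.toList, '\n' ∉ p := by
        rw [hmap]; exact sp_no_nl body.toList
      have hPne : L.map String.toList ≠ [] := by rw [hmap]; simp
      have hB := stripLoopB_join (L.map String.toList) hPne hnlP
      rw [hjoin] at hB
      rw [hB, ← map_dropQuotesS]
      cases hRc : dropQuotesS L with
      | nil => simp [skipBlankS]
      | cons f r =>
        have hfmem : f.toList ∈ L.map String.toList := by
          apply dropQC_subset
          rw [← map_dropQuotesS, hRc]
          simp
        have hfnl : '\n' ∉ f.toList := hnlP _ hfmem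
        have hmapne : (List.map String.toList (f :: r)) ≠ [] := by simp
        rw [if_neg hmapne]
        by_cases hf : f = ""
        · subst hf
          cases r with
          | nil =>
            have hj : PySem.Chars.join ['\n'] (List.map String.toList [("" : String)]) = [] := by
              simp [PySem.Chars.join_singleton]
            rw [hj]
            simp [skipBlankS]
          | cons g r' =>
            have hj : PySem.Chars.join ['\n'] (List.map String.toList ("" :: g :: r'))
                = '\n' :: PySem.Chars.join ['\n'] (List.map String.toList (g :: r')) := by
              simp only [List.map_cons]
              rw [show ("" : String).toList = [] by simp]
              rw [PySem.Chars.join_cons_cons]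
              simp
            rw [hj]
            have hsw : PySem.Chars.startswith ('\n' :: PySem.Chars.join ['\n'] (List.map String.toList (g :: r'))) ['\n'] = true := by
              rw [PySem.Chars.startswith_iff]
              simp [List.cons_prefix_iff]
            simp only [hsw, if_false, if_true, List.cons_ne_nil]
            rw [skipBlankS, if_pos rfl]
            rw [if_neg (by simp)]
            apply String.toList_inj.mp
            simp [PySem.Str.toList_join, String.toList_ofList]
        · rw [skipBlankS, if_neg hf]
          rw [if_neg (by simp)]
          obtain ⟨c, fc, hfc⟩ : ∃ c fc, f.toList = c :: fc := by
            cases hft : f.toList with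
            | nil => exact absurd hft (toList_ne_nil f hf)
            | cons c fc => exact ⟨c, fc, rfl⟩
          have hcnl : c ≠ '\n' := by
            intro hc; subst hc; exact hfnl (by rw [hfc]; simp)
          have hshape : ∃ y, PySem.Chars.join ['\n'] (List.map String.toList (f :: r)) = c :: y := by
            cases r with
            | nil =>
              refine ⟨fc, ?_⟩
              simp only [List.map_cons, List.map_nil]
              rw [PySem.Chars.join_singleton, hfc]
            | cons g r' =>
              refine ⟨fc ++ ['\n'] ++ PySem.Chars.join ['\n'] (List.map String.toList (g :: r')), ?_⟩
              simp only [List.map_cons]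
              rw [PySem.Chars.join_cons_cons, hfc]
              simp
          obtain ⟨y, hy⟩ := hshape
          rw [hy]
          have hsw : PySem.Chars.startswith (c :: y) ['\n'] = false := by
            rw [← Bool.not_eq_true, PySem.Chars.startswith_iff]
            simp [List.cons_prefix_iff]
            exact fun hc => hcnl hc
          simp only [hsw, if_false, Bool.false_eq_true, List.cons_ne_nil]
          apply String.toList_inj.mp
          simp [PySem.Str.toList_join, String.toList_ofList]
          simpa using hy
  · rw [if_neg hg, if_neg hg]
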